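-- pv_equiv track=rewrite | github.com/phumipatc/CU_Submissions | ComProg/09_MoreDC/09_NestedList_34_Fill_In_Number.py | pattern6
-- ===== SOURCE A (Python) =====
-- def pattern6(N):
--     ret = [[0]*N for i in range(N)]
--     cnt = 1
--     stu = 0
--     std = N-1
--     for x in range(N):
--         if x % 2 == 0:
--             i = 0
--             j = stu
--         else:
--             i = std
--             j = N-1
--         stu += 1
--         std -= 1
--         while i < N and j < N and i >= 0 and j >= 0:
--             ret[i][j] = cnt
--             cnt += 1
--             i += 1 if x % 2 == 0 else -1
--             j += 1 if x % 2 == 0 else -1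
--     return ret
-- ===== SOURCE B (Python) =====
-- def pattern6(N):
--     def val(i, j):
--         d = j - i
--         if d < 0:
--             return 0
--         base = d * N - d * (d - 1) // 2
--         return base + 1 + i if d % 2 == 0 else base + (N - d) - i
--     rng = range(N)
--     return [[val(i, j) for j in rng] for i in rng]
-- ===== Notes on version B (the rewrite author's own statement) =====
-- stated objective: simpler
-- what changed: Replaces A's stateful diagonal walk (running counter, mutable matrix, alternating up/down traversals) with a pure nested comprehension that computes each cell directly from a closed-form triangular-number expression of its diagonal offset and row.
import Mathlib
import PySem

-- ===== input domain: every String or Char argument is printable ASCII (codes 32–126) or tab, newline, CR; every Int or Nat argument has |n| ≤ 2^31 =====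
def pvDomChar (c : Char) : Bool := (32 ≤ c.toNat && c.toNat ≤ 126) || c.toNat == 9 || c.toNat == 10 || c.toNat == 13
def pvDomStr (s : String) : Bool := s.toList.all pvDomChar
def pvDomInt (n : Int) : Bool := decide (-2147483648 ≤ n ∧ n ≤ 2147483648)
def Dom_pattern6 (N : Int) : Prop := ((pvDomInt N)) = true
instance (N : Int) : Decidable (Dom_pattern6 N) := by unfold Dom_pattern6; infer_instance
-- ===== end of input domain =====

-- B replaces A's sequential diagonal walk (running counter, mutable matrix) with a per-cell
-- closed-form value; objective: simpler (no mutation, no counter state), not measured faster.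

-- ===== PORT A =====
-- Python's mutable list-of-lists is modelled by Array (Array Int) (converted to lists on return);
-- ret[i][j] = v ; exact because every write in A has 0 ≤ i < len ret and 0 ≤ j < len ret[i]
def pvSet2 (m : Array (Array Int)) (i j v : Int) : Array (Array Int) :=
  m.modify i.toNat (fun row => row.setIfInBounds j.toNat v)

-- the 'while i < N and j < N and i >= 0 and j >= 0' loop; fuel N.toNat+1 bounds its ≤ N iterations
def pvWalk (N : Int) : Nat → Array (Array Int) → Int → Int → Int → Int → Array (Array Int) × Int
  | 0, ret, cnt, _, _, _ => (ret, cnt)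
  | fuel + 1, ret, cnt, i, j, step =>
    if i < N ∧ j < N ∧ 0 ≤ i ∧ 0 ≤ j then
      pvWalk N fuel (pvSet2 ret i j cnt) (cnt + 1) (i + step) (j + step) step
    else (ret, cnt)

-- body of 'for x in range(N)'; state (ret, cnt, stu, std)
def pvStep (N : Int) (s : Array (Array Int) × Int × Int × Int) (x : Int) :
    Array (Array Int) × Int × Int × Int :=
  let (ret, cnt, stu, std) := s
  let i : Int := if PySem.Int.mod x 2 = 0 then 0 else std
  let j : Int := if PySem.Int.mod x 2 = 0 then stu else N - 1
  let step : Int := if PySem.Int.mod x 2 = 0 then 1 else -1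
  let (ret', cnt') := pvWalk N (N.toNat + 1) ret cnt i j step
  (ret', cnt', stu + 1, std - 1)

def pattern6 (N : Int) : List (List Int) :=
  let ret0 := ((PySem.List.pyRange 0 N 1).map (fun _ => Array.replicate N.toNat (0 : Int))).toArray
  (((PySem.List.pyRange 0 N 1).foldl (pvStep N) (ret0, 1, 0, N - 1)).1.toList.map
    (fun r => r.toList))

-- ===== PORT B =====
def pvVal (N i j : Int) : Int :=
  let d := j - i
  if d < 0 then 0
  else
    let base := d * N - PySem.Int.floordiv (d * (d - 1)) 2
    if PySem.Int.mod d 2 = 0 then base + 1 + i else base + (N - d) - i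

def pattern6_alt (N : Int) : List (List Int) :=
  let rng := PySem.List.pyRange 0 N 1
  rng.map (fun i => rng.map (fun j => pvVal N i j))

-- ===== PRECONDITION & SPEC =====
def Spec_pattern6 (N : Int) (out : List (List Int)) : Prop := out = pattern6_alt N
instance (N : Int) (out : List (List Int)) : Decidable (Spec_pattern6 N out) := by unfold Spec_pattern6; infer_instance

-- ===== CLAIM (what is proved, stated in full; the proofs are below) =====
def Claim_equal_pattern6 : Prop := ∀ (N : Int), Dom_pattern6 N → Spec_pattern6 N (pattern6 N)

-- ===== LEMMAS AND PROOFS =====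

-- entry (a,b) of a matrix, 0 outside
def mget (m : Array (Array Int)) (a b : Nat) : Int := ((m[a]?.getD #[])[b]?).getD 0

-- n×n shape
def Shape (n : Nat) (m : Array (Array Int)) : Prop :=
  m.size = n ∧ ∀ a : Nat, (m[a]?.getD #[]).size = if a < n then n else 0

-- numbers used before diagonal d starts
def pvBase (N d : Int) : Int := d * N - (d * (d - 1)) / 2

theorem shape_set2 {n : Nat} {m : Array (Array Int)} (hm : Shape n m) (i j v : Int) :
    Shape n (pvSet2 m i j v) := by
  obtain ⟨h1, h2⟩ := hm
  constructor
  · simpa [pvSet2] using h1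
  · intro a
    rw [pvSet2, Array.getElem?_modify]
    by_cases ha : i.toNat = a
    · rw [if_pos ha]
      cases h : m[a]? with
      | none => simpa [h] using h2 a
      | some row => simpa [h, Array.size_setIfInBounds] using h2 a
    · rw [if_neg ha]
      exact h2 a

theorem mget_set2 {n : Nat} {m : Array (Array Int)} (hm : Shape n m) {i j : Int}
    (hi0 : 0 ≤ i) (hin : i < n) (hj0 : 0 ≤ j) (hjn : j < n) (v : Int) (a b : Nat) :
    mget (pvSet2 m i j v) a b =
      if (a : Int) = i ∧ (b : Int) = j then v else mget m a b := by
  obtain ⟨h1, h2⟩ := hm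
  have hiN : i.toNat < m.size := by omega
  have hrowA : m[i.toNat]? = some (m[i.toNat]'hiN) := Array.getElem?_eq_getElem hiN
  have hrow : (m[i.toNat]'hiN).size = n := by
    have := h2 i.toNat
    rw [if_pos (by omega), hrowA] at this
    exact this
  unfold mget pvSet2
  rw [Array.getElem?_modify]
  by_cases ha : a = i.toNat
  · subst ha
    rw [if_pos rfl, hrowA, Option.map_some, Option.getD_some, Array.getElem?_setIfInBounds]
    by_cases hb : b = j.toNat
    · subst hb
      rw [if_pos rfl, if_pos (by omega), Option.getD_some, if_pos (by omega)]
    · rw [if_neg (by omega), if_neg (by omega), Option.getD_some]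
  · rw [if_neg (by omega), if_neg (by omega)]

-- the even (top-left→down-right) walk: t steps remain, i = N - d - t
theorem walk_pos {n : Nat} (N : Int) (hN : N = (n : Int)) (d : Int) (hd : 0 ≤ d) :
    ∀ (t : Nat) (fuel : Nat) (m : Array (Array Int)) (cnt i : Int),
      Shape n m → i = N - d - t → 0 ≤ i → t ≤ fuel →
      ∃ m', pvWalk N fuel m cnt i (i + d) 1 = (m', cnt + t) ∧ Shape n m' ∧
        ∀ a b : Nat, mget m' a b =
          if i ≤ (a : Int) ∧ (a : Int) < N - d ∧ (b : Int) = a + d then cnt + (a - i)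
          else mget m a b := by
  intro t
  induction t with
  | zero =>
    intro fuel m cnt i hm hi _ _
    have hcond : ¬ (i < N ∧ i + d < N ∧ 0 ≤ i ∧ 0 ≤ i + d) := by omega
    refine ⟨m, ?_, hm, ?_⟩
    · cases fuel with
      | zero => simp [pvWalk]
      | succ f => simp [pvWalk, hcond]
    · intro a b
      rw [if_neg (by omega)]
  | succ t ih =>
    intro fuel m cnt i hm hi hi0 hfuel
    cases fuel with
    | zero => omega
    | succ f =>
      have hcond : i < N ∧ i + d < N ∧ 0 ≤ i ∧ 0 ≤ i + d := by
        push_cast at hi; omega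
      obtain ⟨m', heq, hm', hg⟩ := ih f (pvSet2 m i (i + d) cnt) (cnt + 1) (i + 1)
        (shape_set2 hm _ _ _) (by push_cast at hi ⊢; omega) (by push_cast at hi; omega)
        (by omega)
      refine ⟨m', ?_, hm', ?_⟩
      · show pvWalk N (f + 1) m cnt i (i + d) 1 = _
        simp only [pvWalk]
        rw [if_pos hcond, show i + d + 1 = i + 1 + (d + 0) by ring,
          show cnt + ((t + 1 : Nat) : Int) = cnt + 1 + t by push_cast; ring]
        simpa using heq
      · intro a b
        rw [hg a b, mget_set2 hm (by omega) (by push_cast at hi; omega) (by omega)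
          (by push_cast at hi; omega) cnt a b]
        split_ifs <;> first | rfl | omega

-- the odd (bottom-right→up-left) walk: t steps remain, i = t - 1, j = i + d = N - 1
theorem walk_neg {n : Nat} (N : Int) (hN : N = (n : Int)) (d : Int) (hd : 0 ≤ d) :
    ∀ (t : Nat) (fuel : Nat) (m : Array (Array Int)) (cnt i : Int),
      Shape n m → i = (t : Int) - 1 → (t : Int) + d ≤ N → t ≤ fuel →
      ∃ m', pvWalk N fuel m cnt i (i + d) (-1) = (m', cnt + t) ∧ Shape n m' ∧
        ∀ a b : Nat, mget m' a b =
          if (a : Int) ≤ i ∧ (b : Int) = a + d then cnt + (i - a)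
          else mget m a b := by
  intro t
  induction t with
  | zero =>
    intro fuel m cnt i hm hi _ _
    have hcond : ¬ (i < N ∧ i + d < N ∧ 0 ≤ i ∧ 0 ≤ i + d) := by omega
    refine ⟨m, ?_, hm, ?_⟩
    · cases fuel with
      | zero => simp [pvWalk]
      | succ f => simp [pvWalk, hcond]
    · intro a b
      rw [if_neg (by omega)]
  | succ t ih =>
    intro fuel m cnt i hm hi ht hfuel
    cases fuel with
    | zero => omega
    | succ f =>
      have hcond : i < N ∧ i + d < N ∧ 0 ≤ i ∧ 0 ≤ i + d := by
        push_cast at hi ht; omega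
      obtain ⟨m', heq, hm', hg⟩ := ih f (pvSet2 m i (i + d) cnt) (cnt + 1) (i + -1)
        (shape_set2 hm _ _ _) (by push_cast at hi ⊢; omega) (by push_cast at ht ⊢; omega)
        (by omega)
      refine ⟨m', ?_, hm', ?_⟩
      · show pvWalk N (f + 1) m cnt i (i + d) (-1) = _
        simp only [pvWalk]
        rw [if_pos hcond, show i + d + -1 = i + -1 + d by ring,
          show cnt + ((t + 1 : Nat) : Int) = cnt + 1 + t by push_cast; ring]
        exact heq
      · intro a b
        rw [hg a b, mget_set2 hm (by omega) (by push_cast at hi ht; omega) (by omega)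
          (by push_cast at hi ht; omega) cnt a b]
        split_ifs <;> first | rfl | omega

theorem pvBase_succ (N : Int) (k : Nat) :
    pvBase N ((k : Int) + 1) = pvBase N k + (N - k) := by
  unfold pvBase
  rw [show ((k : Int) + 1) * ((k : Int) + 1 - 1) = (k : Int) * ((k : Int) - 1) + (k : Int) * 2 by
    ring, Int.add_mul_ediv_right _ _ (by norm_num)]
  ring

theorem pvVal_eq (N : Int) (a b : Nat) (hab : a ≤ b) :
    pvVal N a b = if ((b : Int) - a) % 2 = 0 then pvBase N ((b : Int) - a) + 1 + a
      else pvBase N ((b : Int) - a) + (N - ((b : Int) - a)) - a := by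
  simp only [pvVal, pvBase]
  rw [if_neg (by omega), PySem.Int.floordiv_eq_ediv_of_pos (by norm_num),
    PySem.Int.mod_eq_emod_of_pos (by norm_num)]

theorem pvVal_lower (N : Int) (a b : Nat) (hab : b < a) : pvVal N a b = 0 := by
  simp only [pvVal]
  rw [if_pos (by omega)]

theorem shape_ret0 {n : Nat} (N : Int) (hN : N = (n : Int)) :
    Shape n (((PySem.List.pyRange 0 N 1).map
      (fun _ => Array.replicate N.toNat (0 : Int))).toArray) := by
  constructor
  · simp [PySem.List.length_pyRange_one, hN]
  · intro a
    rw [List.getElem?_toArray, List.getElem?_map]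
    by_cases ha : a < n
    · rw [List.getElem?_eq_getElem (by simp [PySem.List.length_pyRange_one]; omega)]
      simp [ha, hN]
    · rw [List.getElem?_eq_none (by simp [PySem.List.length_pyRange_one]; omega)]
      simp [ha]

theorem mget_ret0 (N : Int) (a b : Nat) :
    mget (((PySem.List.pyRange 0 N 1).map
      (fun _ => Array.replicate N.toNat (0 : Int))).toArray) a b = 0 := by
  by_cases ha : (a : Int) < N
  · simp [mget, ha, Array.getElem?_replicate,
      apply_ite (fun o => Option.getD o (0 : Int))]
  · simp [mget, ha]

-- invariant of the outer loop after k diagonals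
theorem outer_inv {n : Nat} (N : Int) (hN : N = (n : Int)) :
    ∀ k : Nat, k ≤ n →
      ∃ M, (PySem.List.pyRange 0 k 1).foldl (pvStep N)
            (((PySem.List.pyRange 0 N 1).map
                (fun _ => Array.replicate N.toNat (0 : Int))).toArray,
              1, 0, N - 1)
          = (M, pvBase N k + 1, (k : Int), N - 1 - k) ∧ Shape n M ∧
        ∀ a b : Nat, mget M a b =
          if a < n ∧ b < n ∧ a ≤ b ∧ (b : Int) - a < k then pvVal N a b else 0 := by
  intro k
  induction k with
  | zero =>
    intro _
    refine ⟨_, ?_, shape_ret0 N hN, ?_⟩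
    · rw [show ((0 : Nat) : Int) = 0 by rfl,
        PySem.List.pyRange_one_eq_nil (le_refl (0 : Int))]
      simp [pvBase]
    · intro a b
      rw [if_neg (by omega), mget_ret0]
  | succ k ih =>
    intro hk1
    have hk : k ≤ n := by omega
    obtain ⟨M, hfold, hM, hg⟩ := ih hk
    have hm2 : PySem.Int.mod (k : Int) 2 = ((k % 2 : Nat) : Int) := by
      rw [PySem.Int.mod_eq_emod_of_pos (by norm_num)]
      push_cast
      ring
    have hsplit : PySem.List.pyRange 0 ((k + 1 : Nat) : Int) 1
        = PySem.List.pyRange 0 (k : Int) 1 ++ [(k : Int)] := by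
      push_cast
      exact PySem.List.pyRange_one_succ_right (by positivity)
    rw [hsplit, List.foldl_append, hfold, List.foldl_cons, List.foldl_nil]
    by_cases hk2 : k % 2 = 0
    · -- even diagonal: top-left → down-right
      have hc : PySem.Int.mod (k : Int) 2 = 0 := by rw [hm2]; omega
      obtain ⟨M', heqw, hM', hgw⟩ := walk_pos N hN (k : Int) (by positivity) (n - k)
        (N.toNat + 1) M (pvBase N k + 1) 0 hM (by omega) (by omega) (by omega)
      rw [zero_add] at heqw
      refine ⟨M', ?_, hM', ?_⟩
      · simp only [pvStep]
        rw [if_pos hc, if_pos hc, if_pos hc, heqw]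
        have hb := pvBase_succ N k
        simp only [Prod.mk.injEq]
        refine ⟨trivial, by push_cast at hb ⊢; omega, by push_cast; ring, by push_cast; ring⟩
      · intro a b
        rw [hgw a b]
        by_cases hnew : (0 : Int) ≤ a ∧ (a : Int) < N - k ∧ (b : Int) = a + k
        · have hba : (b : Int) - a = k := by omega
          rw [if_pos hnew, if_pos (by omega), pvVal_eq N a b (by omega), hba,
            if_pos (by omega)]
          omega
        · rw [if_neg hnew, hg a b]
          by_cases hold : a < n ∧ b < n ∧ a ≤ b ∧ (b : Int) - a < k
          · rw [if_pos hold, if_pos (by omega)]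
          · rw [if_neg hold, if_neg (by omega)]
    · -- odd diagonal: bottom-right → up-left
      have hc : ¬ PySem.Int.mod (k : Int) 2 = 0 := by rw [hm2]; omega
      obtain ⟨M', heqw, hM', hgw⟩ := walk_neg N hN (k : Int) (by positivity) (n - k)
        (N.toNat + 1) M (pvBase N k + 1) (N - 1 - k) hM (by omega) (by omega) (by omega)
      rw [show N - 1 - (k : Int) + k = N - 1 by ring] at heqw
      refine ⟨M', ?_, hM', ?_⟩
      · simp only [pvStep]
        rw [if_neg hc, if_neg hc, if_neg hc, heqw]
        have hb := pvBase_succ N k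
        simp only [Prod.mk.injEq]
        refine ⟨trivial, by push_cast at hb ⊢; omega, by push_cast; ring, by push_cast; ring⟩
      · intro a b
        rw [hgw a b]
        by_cases hnew : (a : Int) ≤ N - 1 - k ∧ (b : Int) = a + k
        · have hba : (b : Int) - a = k := by omega
          rw [if_pos hnew, if_pos (by omega), pvVal_eq N a b (by omega), hba,
            if_neg (by omega)]
          omega
        · rw [if_neg hnew, hg a b]
          by_cases hold : a < n ∧ b < n ∧ a ≤ b ∧ (b : Int) - a < k
          · rw [if_pos hold, if_pos (by omega)]
          · rw [if_neg hold, if_neg (by omega)]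

-- ===== VERDICT (by name: the statement is the Claim_ definition above) =====
theorem pattern6_spec : Claim_equal_pattern6 := by
  intro N _
  show pattern6 N = pattern6_alt N
  by_cases hN0 : N ≤ 0
  · simp [pattern6, pattern6_alt, PySem.List.pyRange_one_eq_nil hN0]
  · have hN : N = (N.toNat : Int) := by omega
    obtain ⟨M, hfold, hM, hg⟩ := outer_inv N hN N.toNat (le_refl N.toNat)
    rw [← hN] at hfold
    have hpat : pattern6 N = M.toList.map (fun r => r.toList) :=
      congrArg (fun p => p.1.toList.map (fun r => r.toList)) hfold
    rw [hpat]
    have hlen_alt : (pattern6_alt N).length = N.toNat := by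
      simp [pattern6_alt, PySem.List.length_pyRange_one]
    apply List.ext_getElem (by rw [List.length_map, Array.length_toList, hM.1, hlen_alt])
    intro a h1 h2
    have ha : a < N.toNat := by
      simp only [List.length_map, Array.length_toList, hM.1] at h1
      exact h1
    have haM : a < M.size := by have := hM.1; omega
    have hMa : M[a]? = some (M[a]'haM) := Array.getElem?_eq_getElem haM
    have hrowlen : (M[a]'haM).size = N.toNat := by
      have := hM.2 a
      rw [if_pos ha, hMa] at this
      exact this
    have hrowL : (M.toList.map (fun r => r.toList))[a]'h1 = (M[a]'haM).toList := by
      rw [List.getElem_map, Array.getElem_toList]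
    have haltrow : (pattern6_alt N)[a]'h2 =
        (PySem.List.pyRange 0 N 1).map (fun j => pvVal N (0 + (a : Int)) j) := by
      simp [pattern6_alt, PySem.List.getElem_pyRange_one]
    rw [hrowL, haltrow]
    apply List.ext_getElem
      (by simp [Array.length_toList, hrowlen, PySem.List.length_pyRange_one])
    intro b hb1 hb2
    have hb : b < N.toNat := by
      simp only [Array.length_toList, hrowlen] at hb1
      exact hb1
    have hbM : b < (M[a]'haM).size := by omega
    have hMab : (M[a]'haM).toList[b]'hb1 = mget M a b := by
      rw [Array.getElem_toList, mget, hMa, Option.getD_some,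
        Array.getElem?_eq_getElem hbM, Option.getD_some]
    rw [hMab, hg a b, List.getElem_map, PySem.List.getElem_pyRange_one]
    by_cases hab : a ≤ b
    · rw [if_pos ⟨ha, hb, hab, by omega⟩, zero_add, zero_add]
    · rw [if_neg (by omega), zero_add, zero_add, pvVal_lower N a b (by omega)]
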